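-- pv_equiv track=rewrite | github.com/austinchen15/Austin-Chen-Python-Battleship | Battleship.py | hitcheck2
-- ===== SOURCE A (Python) =====
-- def hitcheck2(Carrier,Battle,Destroy,Sub,Patrol,choice):
--     #has if statement check if the point chosen was even part of the ship
--     if choice == Patrol[0] or choice == Patrol[1]:
--         #goes through the ship and replaces the hit point with "hit"
--         for i in range(2):
--             if choice == Patrol[i]:
--                 Patrol[i] = "hit"
--                 #returns a statement and breaks loop
--                 turn = "hit_Patrol Boat"
--                 break
--     #same
--     elif choice == Sub[0] or choice == Sub[1] or choice == Sub[2]: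
--         for i in range(3):
--             if choice == Sub[i]:
--                 Sub[i] = "hit"
--                 turn = "hit_Submarine"
--                 break
--     #same
--     elif choice == Destroy[0] or choice == Destroy[1] or choice == Destroy[2]:
--         for i in range(3):
--             if choice == Destroy[i]:
--                 Destroy[i] = "hit"
--                 turn = "hit_Destroyer"
--                 break
--     #same
--     elif choice == Battle[0] or choice == Battle[1] or choice == Battle[2] or choice == Battle[3]:
--         for i in range(4):
--             if choice == Battle[i]:
--                 Battle[i] = "hit"
--                 turn = "hit_Battleship"
--                 break
--     #same
--     elif choice == Carrier[0] or choice == Carrier[1] or choice == Carrier[2] or choice == Carrier[3] or choice == Carrier[4]: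
--         for i in range(5):
--             if choice == Carrier[i]:
--                 Carrier[i] = "hit"
--                 turn = "hit_Aircraft Carrier"
--                 break
--     #final case is here incase nothing matched
--     else:
--         turn = "miss"
--     #returns the statement of whether something was hit or missed
--     return turn
-- ===== SOURCE B (Python) =====
-- def hitcheck2(Carrier, Battle, Destroy, Sub, Patrol, choice):
--     # Build one hash index cell -> (ship, position, status) over all checked cells,
--     # earliest ship / earliest position winning, then resolve the shot with a single lookup.
--     index = {}
--     for ship, size, status in ((Patrol, 2, "hit_Patrol Boat"),
--                                (Sub, 3, "hit_Submarine"),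
--                                (Destroy, 3, "hit_Destroyer"),
--                                (Battle, 4, "hit_Battleship"),
--                                (Carrier, 5, "hit_Aircraft Carrier")):
--         for i, cell in enumerate(ship[:size]):
--             index.setdefault(cell, (ship, i, status))
--     hit = index.get(choice)
--     if hit is None:
--         return "miss"
--     ship, i, status = hit
--     ship[i] = "hit"
--     return status
-- ===== Notes on version B (the rewrite author's own statement) =====
-- stated objective: alternative
-- what changed: Replaces A's five-branch elif ladder with per-ship guard chains and inner marking loops by building one hash index mapping every checked cell to its (ship, position, status), then resolving the shot with a single dictionary lookup.
import Mathlib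
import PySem

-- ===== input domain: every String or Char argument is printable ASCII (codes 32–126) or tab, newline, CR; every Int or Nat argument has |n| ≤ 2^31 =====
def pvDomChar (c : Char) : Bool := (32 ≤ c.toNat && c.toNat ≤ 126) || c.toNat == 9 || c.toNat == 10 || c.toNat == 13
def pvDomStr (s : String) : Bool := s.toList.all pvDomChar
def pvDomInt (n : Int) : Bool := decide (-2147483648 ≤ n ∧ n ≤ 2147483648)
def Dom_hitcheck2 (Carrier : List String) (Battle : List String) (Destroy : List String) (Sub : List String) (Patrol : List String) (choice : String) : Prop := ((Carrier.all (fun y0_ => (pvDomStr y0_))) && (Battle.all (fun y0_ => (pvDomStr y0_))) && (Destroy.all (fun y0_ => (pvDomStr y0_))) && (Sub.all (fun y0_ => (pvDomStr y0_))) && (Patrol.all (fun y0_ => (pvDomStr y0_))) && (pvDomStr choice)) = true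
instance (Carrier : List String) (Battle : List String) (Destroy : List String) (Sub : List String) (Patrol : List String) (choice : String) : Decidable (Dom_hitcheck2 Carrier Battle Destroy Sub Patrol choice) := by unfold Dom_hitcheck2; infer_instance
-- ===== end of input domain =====

-- B replaces A's elif ladder (per-ship guard chains + inner marking loops) by a hash index built
-- once from all checked cells, resolved with a single dict lookup; objective: alternative.
-- Both Pythons mutate the hit ship list in place identically on Pre_; the equivalence proved
-- here is about the return value.

-- ===== PORT A =====
-- Python list indexing ship[i]; Pre_ keeps every index used in range, so the "" default is never the result.
def pvGetS (xs : List String) (i : Int) : String := (PySem.List.pyGet? xs i).getD ""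

-- A's inner `for i in range(n): if choice == ship[i]: …; turn = label; break` (mutation dropped: return value only)
def pvLoopHit (choice : String) (xs : List String) (n : Nat) (label : String) : Option String :=
  (List.range n).foldl
    (fun (turn : Option String) (i : Nat) =>
      match turn with
      | some t => some t
      | none => if choice == pvGetS xs (Int.ofNat i) then some label else none)
    none

def hitcheck2 (Carrier : List String) (Battle : List String) (Destroy : List String) (Sub : List String) (Patrol : List String) (choice : String) : String :=
  if choice == pvGetS Patrol 0 || choice == pvGetS Patrol 1 then
    (pvLoopHit choice Patrol 2 "hit_Patrol Boat").getD "miss"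
  else if choice == pvGetS Sub 0 || choice == pvGetS Sub 1 || choice == pvGetS Sub 2 then
    (pvLoopHit choice Sub 3 "hit_Submarine").getD "miss"
  else if choice == pvGetS Destroy 0 || choice == pvGetS Destroy 1 || choice == pvGetS Destroy 2 then
    (pvLoopHit choice Destroy 3 "hit_Destroyer").getD "miss"
  else if choice == pvGetS Battle 0 || choice == pvGetS Battle 1 || choice == pvGetS Battle 2 || choice == pvGetS Battle 3 then
    (pvLoopHit choice Battle 4 "hit_Battleship").getD "miss"
  else if choice == pvGetS Carrier 0 || choice == pvGetS Carrier 1 || choice == pvGetS Carrier 2 || choice == pvGetS Carrier 3 || choice == pvGetS Carrier 4 then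
    (pvLoopHit choice Carrier 5 "hit_Aircraft Carrier").getD "miss"
  else
    "miss"

-- ===== PORT B =====
-- B's inner `for i, cell in enumerate(ship[:size]): index.setdefault(cell, (ship, i, status))`
def pvIndexShip (d : PySem.Dict String (List String × Int × String))
    (ship : List String) (size : Nat) (status : String) :
    PySem.Dict String (List String × Int × String) :=
  (PySem.List.enumerate (PySem.List.slice ship none (some (size : Int)))).foldl
    (fun d' p => d'.setdefault p.2 (ship, p.1, status)) d

def hitcheck2_alt (Carrier : List String) (Battle : List String) (Destroy : List String) (Sub : List String) (Patrol : List String) (choice : String) : String :=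
  let d1 := pvIndexShip PySem.Dict.empty Patrol 2 "hit_Patrol Boat"
  let d2 := pvIndexShip d1 Sub 3 "hit_Submarine"
  let d3 := pvIndexShip d2 Destroy 3 "hit_Destroyer"
  let d4 := pvIndexShip d3 Battle 4 "hit_Battleship"
  let d5 := pvIndexShip d4 Carrier 5 "hit_Aircraft Carrier"
  match d5.get? choice with
  | none => "miss"
  | some hit => hit.2.2   -- (mutation ship[i] = "hit" dropped: return value only)

-- ===== PRECONDITION & SPEC =====
-- Pre_ is exactly where A returns: A's elif ladder indexes a ship's first 2/3/3/4/5 cells with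
-- short-circuiting, so it raises IndexError precisely when some evaluated ship list is shorter than
-- its cell count and contains no match (earlier ships unhit).
def Pre_hitcheck2 (Carrier : List String) (Battle : List String) (Destroy : List String) (Sub : List String) (Patrol : List String) (choice : String) : Prop :=
  (2 ≤ Patrol.length ∨ choice ∈ Patrol) ∧
  (choice ∉ Patrol.take 2 →
    (3 ≤ Sub.length ∨ choice ∈ Sub) ∧
    (choice ∉ Sub.take 3 →
      (3 ≤ Destroy.length ∨ choice ∈ Destroy) ∧
      (choice ∉ Destroy.take 3 →
        (4 ≤ Battle.length ∨ choice ∈ Battle) ∧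
        (choice ∉ Battle.take 4 →
          (5 ≤ Carrier.length ∨ choice ∈ Carrier)))))
instance (Carrier : List String) (Battle : List String) (Destroy : List String) (Sub : List String) (Patrol : List String) (choice : String) : Decidable (Pre_hitcheck2 Carrier Battle Destroy Sub Patrol choice) := by unfold Pre_hitcheck2; infer_instance

def pvWitness_hitcheck2 : List String × List String × List String × List String × List String × String :=
  (["c1","c2","c3","c4","c5"], ["b1","b2","b3","b4"], ["d1","d2","d3"], ["s1","s2","s3"], ["p1","p2"], "s2")

def Spec_hitcheck2 (Carrier : List String) (Battle : List String) (Destroy : List String) (Sub : List String) (Patrol : List String) (choice : String) (out : String) : Prop := out = hitcheck2_alt Carrier Battle Destroy Sub Patrol choice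
instance (Carrier : List String) (Battle : List String) (Destroy : List String) (Sub : List String) (Patrol : List String) (choice : String) (out : String) : Decidable (Spec_hitcheck2 Carrier Battle Destroy Sub Patrol choice out) := by unfold Spec_hitcheck2; infer_instance

-- ===== CLAIM (what is proved, stated in full; the proofs are below) =====
def Claim_equal_hitcheck2 : Prop := ∀ (Carrier : List String) (Battle : List String) (Destroy : List String) (Sub : List String) (Patrol : List String) (choice : String), Dom_hitcheck2 Carrier Battle Destroy Sub Patrol choice → Pre_hitcheck2 Carrier Battle Destroy Sub Patrol choice → Spec_hitcheck2 Carrier Battle Destroy Sub Patrol choice (hitcheck2 Carrier Battle Destroy Sub Patrol choice)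

-- ===== LEMMAS AND PROOFS =====

-- A-side: evaluating A's guards and inner loops

theorem pvGetS_lt (xs : List String) (i : Nat) (h : i < xs.length) : pvGetS xs (Int.ofNat i) = xs[i] := by
  simp [pvGetS, PySem.List.pyGet?, PySem.List.pyIdx?]
  rw [if_pos (by omega)]
  simp [h]

theorem pvGetS_ge (xs : List String) (i : Nat) (h : xs.length ≤ i) : pvGetS xs (Int.ofNat i) = "" := by
  simp [pvGetS, PySem.List.pyGet?, PySem.List.pyIdx?]
  rw [if_neg (by omega)]
  simp

theorem pvFoldl_step_some (p : Nat → Bool) (label : String) (l : List Nat) (t : String) :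
    l.foldl (fun turn i => match turn with | some t' => some t' | none => if p i then some label else none) (some t) = some t := by
  induction l <;> simp_all

theorem pvFoldl_step_none (p : Nat → Bool) (label : String) (l : List Nat) :
    l.foldl (fun turn i => match turn with | some t' => some t' | none => if p i then some label else none) none = if l.any p then some label else none := by
  induction l with
  | nil => simp
  | cons x xs ih => by_cases h : p x <;> simp [h, ih, pvFoldl_step_some]

theorem pvLoopHit_eq (c : String) (xs : List String) (n : Nat) (label : String) :
    pvLoopHit c xs n label = if (List.range n).any (fun i => c == pvGetS xs (Int.ofNat i)) then some label else none := by
  unfold pvLoopHit; exact pvFoldl_step_none _ _ _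

theorem guard_take (c : String) (xs : List String) (n : Nat) (hOk : n ≤ xs.length ∨ c ∈ xs) :
    ((List.range n).any (fun i => c == pvGetS xs (Int.ofNat i))) = (xs.take n).contains c := by
  rw [Bool.eq_iff_iff]
  simp only [List.any_eq_true, List.mem_range, List.contains_iff_mem, beq_iff_eq]
  constructor
  · rintro ⟨i, hi, hc⟩
    by_cases hil : i < xs.length
    · rw [pvGetS_lt xs i hil] at hc
      exact List.mem_take_iff_getElem.mpr ⟨i, by omega, hc.symm⟩
    · rw [pvGetS_ge xs i (by omega)] at hc
      rcases hOk with h | h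
      · omega
      · rw [List.take_of_length_le (by omega)]
        exact hc ▸ h
  · intro hmem
    obtain ⟨i, hi, hg⟩ := List.mem_take_iff_getElem.mp hmem
    exact ⟨i, by omega, by rw [pvGetS_lt xs i (by omega)]; exact hg.symm⟩

theorem pvLoop_take (c : String) (xs : List String) (n : Nat) (label : String) (hOk : n ≤ xs.length ∨ c ∈ xs) :
    (pvLoopHit c xs n label).getD "miss" = if c ∈ xs.take n then label else "miss" := by
  rw [pvLoopHit_eq, guard_take c xs n hOk]
  by_cases h : c ∈ xs.take n <;> simp [h]

theorem guard2 (c : String) (xs : List String) (hOk : 2 ≤ xs.length ∨ c ∈ xs) :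
    (c = pvGetS xs 0 ∨ c = pvGetS xs 1) ↔ c ∈ xs.take 2 := by
  have h := guard_take c xs 2 hOk
  rw [Bool.eq_iff_iff] at h
  simpa [List.range_succ, Int.ofNat_eq_natCast] using h

theorem guard3 (c : String) (xs : List String) (hOk : 3 ≤ xs.length ∨ c ∈ xs) :
    ((c = pvGetS xs 0 ∨ c = pvGetS xs 1) ∨ c = pvGetS xs 2) ↔ c ∈ xs.take 3 := by
  have h := guard_take c xs 3 hOk
  rw [Bool.eq_iff_iff] at h
  simpa [List.range_succ, Int.ofNat_eq_natCast, or_assoc] using h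

theorem guard4 (c : String) (xs : List String) (hOk : 4 ≤ xs.length ∨ c ∈ xs) :
    (((c = pvGetS xs 0 ∨ c = pvGetS xs 1) ∨ c = pvGetS xs 2) ∨ c = pvGetS xs 3) ↔ c ∈ xs.take 4 := by
  have h := guard_take c xs 4 hOk
  rw [Bool.eq_iff_iff] at h
  simpa [List.range_succ, Int.ofNat_eq_natCast, or_assoc] using h

theorem guard5 (c : String) (xs : List String) (hOk : 5 ≤ xs.length ∨ c ∈ xs) :
    ((((c = pvGetS xs 0 ∨ c = pvGetS xs 1) ∨ c = pvGetS xs 2) ∨ c = pvGetS xs 3) ∨ c = pvGetS xs 4) ↔ c ∈ xs.take 5 := by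
  have h := guard_take c xs 5 hOk
  rw [Bool.eq_iff_iff] at h
  simpa [List.range_succ, Int.ofNat_eq_natCast, or_assoc] using h

-- B-side: the lookup after folding setdefault over one ship's enumerated cells

theorem pvFold_setdefault_get? (ship : List String) (status : String) (c : String)
    (l : List (Int × String)) (d : PySem.Dict String (List String × Int × String)) :
    (l.foldl (fun d' p => d'.setdefault p.2 (ship, p.1, status)) d).get? c =
      match d.get? c with
      | some v => some v
      | none => (l.find? (fun p => p.2 == c)).map (fun p => (ship, p.1, status)) := by
  induction l generalizing d with
  | nil => cases hd : d.get? c <;> simp [hd]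
  | cons p l ih =>
    simp only [List.foldl_cons, ih]
    by_cases hpc : p.2 = c
    · subst hpc
      cases hd : d.get? p.2 with
      | some v => simp [PySem.Dict.get?_setdefault_self, hd]
      | none => simp [PySem.Dict.get?_setdefault_self, hd, List.find?]
    · rw [PySem.Dict.get?_setdefault_of_ne _ _ (by exact fun h => hpc h.symm)]
      have hb : (p.2 == c) = false := beq_false_of_ne hpc
      cases d.get? c <;> simp [List.find?, hb]

theorem pvIndexShip_keep (d : PySem.Dict String (List String × Int × String))
    (ship : List String) (n : Nat) (status c : String) (v : List String × Int × String)
    (hd : d.get? c = some v) :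
    (pvIndexShip d ship n status).get? c = some v := by
  unfold pvIndexShip
  rw [pvFold_setdefault_get?, hd]

theorem pvIndexShip_none_get? (d : PySem.Dict String (List String × Int × String))
    (ship : List String) (n : Nat) (status c : String) (hd : d.get? c = none) :
    (pvIndexShip d ship n status).get? c =
      ((PySem.List.enumerate (ship.take n)).find? (fun p => p.2 == c)).map
        (fun p => (ship, p.1, status)) := by
  unfold pvIndexShip
  rw [pvFold_setdefault_get?, hd, PySem.List.slice_to_natCast]

theorem pvFind_enumerate_isSome (xs : List String) (c : String) (hc : c ∈ xs) :
    ((PySem.List.enumerate xs).find? (fun p => p.2 == c)).isSome := by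
  rw [List.find?_isSome]
  obtain ⟨k, hk, he⟩ := List.mem_iff_getElem.mp hc
  exact ⟨((k : Int), c), (PySem.List.mem_enumerate_iff _ _ _).mpr ⟨k, hk, by simp [he]⟩, by simp⟩

theorem pvFind_enumerate_none (xs : List String) (c : String) (hc : c ∉ xs) :
    (PySem.List.enumerate xs).find? (fun p => p.2 == c) = none := by
  rw [List.find?_eq_none]
  intro p hp
  obtain ⟨k, hk, he⟩ := (PySem.List.mem_enumerate_iff _ _ _).mp hp
  simp only [he, beq_iff_eq]
  exact fun h => hc (h ▸ List.getElem_mem hk)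

theorem pvIndexShip_found (d : PySem.Dict String (List String × Int × String))
    (ship : List String) (n : Nat) (status c : String)
    (hd : d.get? c = none) (hc : c ∈ ship.take n) :
    ∃ i, (pvIndexShip d ship n status).get? c = some (ship, i, status) := by
  rw [pvIndexShip_none_get? d ship n status c hd]
  obtain ⟨p, hp⟩ := Option.isSome_iff_exists.mp (pvFind_enumerate_isSome (ship.take n) c hc)
  exact ⟨p.1, by rw [hp]; rfl⟩

theorem pvIndexShip_notfound (d : PySem.Dict String (List String × Int × String))
    (ship : List String) (n : Nat) (status c : String)
    (hd : d.get? c = none) (hc : c ∉ ship.take n) :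
    (pvIndexShip d ship n status).get? c = none := by
  rw [pvIndexShip_none_get? d ship n status c hd, pvFind_enumerate_none _ _ hc]
  rfl

-- ===== VERDICT (by name: the statement is the Claim_ definition above) =====
theorem hitcheck2_spec : Claim_equal_hitcheck2 := by
  intro Carrier Battle Destroy Sub Patrol choice _hDom hPre
  obtain ⟨hOk1, hrest⟩ := hPre
  unfold Spec_hitcheck2
  have h0 : (PySem.Dict.empty : PySem.Dict String (List String × Int × String)).get? choice = none := rfl
  by_cases h1 : choice ∈ Patrol.take 2
  · obtain ⟨i, hi⟩ := pvIndexShip_found _ Patrol 2 "hit_Patrol Boat" choice h0 h1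
    have hB := pvIndexShip_keep _ Carrier 5 "hit_Aircraft Carrier" choice _
      (pvIndexShip_keep _ Battle 4 "hit_Battleship" choice _
        (pvIndexShip_keep _ Destroy 3 "hit_Destroyer" choice _
          (pvIndexShip_keep _ Sub 3 "hit_Submarine" choice _ hi)))
    simp [hitcheck2, hitcheck2_alt, hB, guard2 choice Patrol hOk1, h1,
          pvLoop_take choice Patrol 2 _ hOk1]
  · have hd1 := pvIndexShip_notfound _ Patrol 2 "hit_Patrol Boat" choice h0 h1
    obtain ⟨hOk2, hrest2⟩ := hrest h1
    by_cases h2 : choice ∈ Sub.take 3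
    · obtain ⟨i, hi⟩ := pvIndexShip_found _ Sub 3 "hit_Submarine" choice hd1 h2
      have hB := pvIndexShip_keep _ Carrier 5 "hit_Aircraft Carrier" choice _
        (pvIndexShip_keep _ Battle 4 "hit_Battleship" choice _
          (pvIndexShip_keep _ Destroy 3 "hit_Destroyer" choice _ hi))
      simp [hitcheck2, hitcheck2_alt, hB, guard2 choice Patrol hOk1, guard3 choice Sub hOk2,
            h1, h2, pvLoop_take choice Sub 3 _ hOk2]
    · have hd2 := pvIndexShip_notfound _ Sub 3 "hit_Submarine" choice hd1 h2
      obtain ⟨hOk3, hrest3⟩ := hrest2 h2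
      by_cases h3 : choice ∈ Destroy.take 3
      · obtain ⟨i, hi⟩ := pvIndexShip_found _ Destroy 3 "hit_Destroyer" choice hd2 h3
        have hB := pvIndexShip_keep _ Carrier 5 "hit_Aircraft Carrier" choice _
          (pvIndexShip_keep _ Battle 4 "hit_Battleship" choice _ hi)
        simp [hitcheck2, hitcheck2_alt, hB, guard2 choice Patrol hOk1, guard3 choice Sub hOk2,
              guard3 choice Destroy hOk3, h1, h2, h3, pvLoop_take choice Destroy 3 _ hOk3]
      · have hd3 := pvIndexShip_notfound _ Destroy 3 "hit_Destroyer" choice hd2 h3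
        obtain ⟨hOk4, hrest4⟩ := hrest3 h3
        by_cases h4 : choice ∈ Battle.take 4
        · obtain ⟨i, hi⟩ := pvIndexShip_found _ Battle 4 "hit_Battleship" choice hd3 h4
          have hB := pvIndexShip_keep _ Carrier 5 "hit_Aircraft Carrier" choice _ hi
          simp [hitcheck2, hitcheck2_alt, hB, guard2 choice Patrol hOk1, guard3 choice Sub hOk2,
                guard3 choice Destroy hOk3, guard4 choice Battle hOk4, h1, h2, h3, h4,
                pvLoop_take choice Battle 4 _ hOk4]
        · have hd4 := pvIndexShip_notfound _ Battle 4 "hit_Battleship" choice hd3 h4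
          have hOk5 := hrest4 h4
          by_cases h5 : choice ∈ Carrier.take 5
          · obtain ⟨i, hB⟩ := pvIndexShip_found _ Carrier 5 "hit_Aircraft Carrier" choice hd4 h5
            simp [hitcheck2, hitcheck2_alt, hB, guard2 choice Patrol hOk1, guard3 choice Sub hOk2,
                  guard3 choice Destroy hOk3, guard4 choice Battle hOk4, guard5 choice Carrier hOk5,
                  h1, h2, h3, h4, h5, pvLoop_take choice Carrier 5 _ hOk5]
          · have hB := pvIndexShip_notfound _ Carrier 5 "hit_Aircraft Carrier" choice hd4 h5
            simp [hitcheck2, hitcheck2_alt, hB, guard2 choice Patrol hOk1, guard3 choice Sub hOk2,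
                  guard3 choice Destroy hOk3, guard4 choice Battle hOk4, guard5 choice Carrier hOk5,
                  h1, h2, h3, h4, h5]
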